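-- pv_equiv track=rewrite | github.com/conjure-up/conjure-up | bundleplacer/ui/options_column.py | strip_solo_dots
-- ===== SOURCE A (Python) =====
-- def strip_solo_dots(s):
--     ls = s.split("\n")
--     rl = []
--     for l in ls:
--         if l == ".":
--             rl.append("")
--         else:
--             rl.append(l)
--     return "\n".join(rl)
-- ===== SOURCE B (Python) =====
-- def strip_solo_dots(s):
--     # Single left-to-right scan: drop a '.' that starts a line and is
--     # immediately followed by a newline or the end of the string.
--     out = []
--     at_start = True
--     n = len(s)
--     for i, c in enumerate(s):
--         if at_start and c == '.' and (i + 1 == n or s[i + 1] == '\n'):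
--             at_start = False
--         else:
--             out.append(c)
--             at_start = c == '\n'
--     return ''.join(out)
-- ===== Notes on version B (the rewrite author's own statement) =====
-- stated objective: alternative
-- what changed: Replaces the split/per-line-loop/join over the list of lines with a single character scan that tracks line starts and drops a dot that begins a line and is immediately followed by a line break or the end of the string, never materialising the list of lines.
import Mathlib
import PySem

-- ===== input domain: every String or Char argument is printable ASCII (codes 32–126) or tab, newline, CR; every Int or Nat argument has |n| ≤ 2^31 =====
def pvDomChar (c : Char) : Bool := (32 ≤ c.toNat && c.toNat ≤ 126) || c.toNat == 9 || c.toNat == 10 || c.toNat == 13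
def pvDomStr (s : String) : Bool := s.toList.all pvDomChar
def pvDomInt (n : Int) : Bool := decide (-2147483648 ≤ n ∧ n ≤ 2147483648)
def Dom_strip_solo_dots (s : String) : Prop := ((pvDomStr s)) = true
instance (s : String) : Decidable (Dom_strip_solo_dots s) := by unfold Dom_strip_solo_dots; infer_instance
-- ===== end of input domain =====

-- B replaces A's split/loop/join over the list of lines by a single character
-- scan with a line-start flag (objective: alternative algorithm, same cost).

-- ===== PORT A =====
-- ls = s.split("\n"); for l in ls: rl.append("" if l == "." else l); return "\n".join(rl)
def strip_solo_dots (s : String) : String :=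
  let ls := PySem.Chars.splitOn s.toList ['\n']
  let rl := ls.foldl (fun rl l => rl ++ [if l = ['.'] then [] else l]) []
  String.ofList (PySem.Chars.join ['\n'] rl)

-- ===== PORT B =====
-- `i + 1 == n or s[i+1] == '\n'`: the next position is the end or holds a newline
def nextIsNlOrEnd : List Char → Bool
  | [] => true
  | d :: _ => d == '\n'

-- the scan loop of Source B: flag `at_start`, one pass over the characters
def stripGo : Bool → List Char → List Char
  | _, [] => []
  | atStart, c :: rest =>
    if atStart && (c == '.') && nextIsNlOrEnd rest then stripGo false rest
    else c :: stripGo (c == '\n') rest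

def strip_solo_dots_alt (s : String) : String :=
  String.ofList (stripGo true s.toList)

-- ===== PRECONDITION & SPEC =====
def Spec_strip_solo_dots (s : String) (out : String) : Prop := out = strip_solo_dots_alt s
instance (s : String) (out : String) : Decidable (Spec_strip_solo_dots s out) := by unfold Spec_strip_solo_dots; infer_instance

-- ===== CLAIM (what is proved, stated in full; the proofs are below) =====
def Claim_equal_strip_solo_dots : Prop := ∀ (s : String), Dom_strip_solo_dots s → Spec_strip_solo_dots s (strip_solo_dots s)

-- ===== LEMMAS AND PROOFS =====

-- reference split on '\n': (first line, remaining lines)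
def splitNl : List Char → List Char × List (List Char)
  | [] => ([], [])
  | c :: r =>
    let p := splitNl r
    if c = '\n' then ([], p.1 :: p.2) else (c :: p.1, p.2)

theorem go_inv (l : List Char) : ∀ (fuel : Nat) (cur : List Char) (acc : List (List Char)),
    l.length ≤ fuel →
    PySem.Chars.splitOn.go ['\n'] fuel l cur acc
      = acc.reverse ++ (cur.reverse ++ (splitNl l).1) :: (splitNl l).2 := by
  induction l with
  | nil =>
    intro fuel cur acc _
    cases fuel <;> simp [PySem.Chars.splitOn.go, splitNl]
  | cons c r ih =>
    intro fuel cur acc hle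
    cases fuel with
    | zero => simp at hle
    | succ f =>
      simp only [PySem.Chars.splitOn.go]
      by_cases hc : c = '\n'
      · subst hc
        have hpre : List.isPrefixOf ['\n'] ('\n' :: r) = true := by
          simp [List.isPrefixOf]
        rw [if_pos hpre]
        have : List.drop (['\n'] : List Char).length ('\n' :: r) = r := by simp
        rw [this, ih f [] (List.reverse cur :: acc) (by simpa using Nat.lt_succ_iff.mp (by simpa using hle))]
        simp [splitNl]
      · have hpre : List.isPrefixOf ['\n'] (c :: r) = false := by
          simp only [List.isPrefixOf, Bool.and_true, beq_eq_false_iff_ne, ne_eq]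
          exact fun h => hc h.symm
        rw [if_neg (by simp [hpre])]
        rw [ih f (c :: cur) acc (by simpa using Nat.lt_succ_iff.mp (by simpa using hle))]
        simp [splitNl, hc]

theorem splitOn_eq (cs : List Char) :
    PySem.Chars.splitOn cs ['\n'] = (splitNl cs).1 :: (splitNl cs).2 := by
  have := go_inv cs (cs.length + 1) [] [] (by omega)
  simpa [PySem.Chars.splitOn] using this

theorem fst_splitNl_nil_iff (r : List Char) :
    ((splitNl r).1 = [] ↔ nextIsNlOrEnd r = true) := by
  cases r with
  | nil => simp [splitNl, nextIsNlOrEnd]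
  | cons d r' =>
    by_cases hd : d = '\n' <;> simp [splitNl, nextIsNlOrEnd, hd]

theorem join_cons_char (c : Char) (h : List Char) (t : List (List Char)) :
    PySem.Chars.join ['\n'] ((c :: h) :: t) = c :: PySem.Chars.join ['\n'] (h :: t) := by
  cases t with
  | nil => simp [PySem.Chars.join_singleton]
  | cons y t' => simp [PySem.Chars.join_cons_cons]

theorem stripGo_eq (cs : List Char) :
    (stripGo true cs
      = PySem.Chars.join ['\n']
          (((splitNl cs).1 :: (splitNl cs).2).map (fun l => if l = ['.'] then [] else l)))
    ∧ (stripGo false cs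
      = PySem.Chars.join ['\n']
          ((splitNl cs).1 :: (splitNl cs).2.map (fun l => if l = ['.'] then [] else l))) := by
  induction cs with
  | nil => simp [stripGo, splitNl, PySem.Chars.join_singleton]
  | cons c r ih =>
    obtain ⟨ih1, ih2⟩ := ih
    have hGo1 : stripGo true (c :: r)
        = if (c == '.') && nextIsNlOrEnd r then stripGo false r
          else c :: stripGo (c == '\n') r := by
      simp [stripGo]
    have hGo2 : stripGo false (c :: r) = c :: stripGo (c == '\n') r := by
      simp [stripGo]
    constructor
    · by_cases hskip : ((c == '.') && nextIsNlOrEnd r) = true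
      · have hc : c = '.' := beq_iff_eq.mp ((Bool.and_eq_true _ _).mp hskip).1
        have hh : (splitNl r).1 = [] :=
          (fst_splitNl_nil_iff r).mpr ((Bool.and_eq_true _ _).mp hskip).2
        rw [hGo1, if_pos hskip, ih2, hh]
        subst hc
        simp [splitNl, show ('.' : Char) ≠ '\n' by decide, hh]
      · rw [hGo1, if_neg hskip]
        by_cases hc : c = '\n'
        · subst hc
          rw [show (('\n' : Char) == '\n') = true by decide, ih1]
          simp [splitNl, PySem.Chars.join_cons_cons]
        · rw [show ((c == '\n')) = false by simp [hc], ih2]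
          have hne : c :: (splitNl r).1 ≠ ['.'] := by
            intro he
            have hc' : c = '.' ∧ (splitNl r).1 = [] := by simpa using he
            exact hskip (by simp [hc'.1, (fst_splitNl_nil_iff r).mp hc'.2])
          simp only [splitNl, if_neg hc, List.map_cons, if_neg hne]
          rw [join_cons_char]
    · rw [hGo2]
      by_cases hc : c = '\n'
      · subst hc
        rw [show (('\n' : Char) == '\n') = true by decide, ih1]
        simp [splitNl, PySem.Chars.join_cons_cons]
      · rw [show ((c == '\n')) = false by simp [hc], ih2]
        simp only [splitNl, if_neg hc]
        rw [join_cons_char]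

-- ===== VERDICT (by name: the statement is the Claim_ definition above) =====
theorem strip_solo_dots_spec : Claim_equal_strip_solo_dots := by
  intro s _
  unfold Spec_strip_solo_dots strip_solo_dots strip_solo_dots_alt
  simp only [splitOn_eq, PySem.List.foldl_append_singleton_eq_map, List.nil_append,
    (stripGo_eq s.toList).1]
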